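-- pv_equiv track=rewrite | github.com/nitthilan/volumetric_video | encoder/nerf_vox_surf/dataloader.py | get_split_index
-- ===== SOURCE A (Python) =====
-- def get_split_index(max_img_idx, split):
--     skip_every = 20
--     test_idx = 0
--     val_idx = 1
--     idx_lst = []
--     for i in range(max_img_idx):
--         if(split == "test" and (i%skip_every == test_idx)):
--             idx_lst.append(i)
--         elif(split == "val" and (i%skip_every == val_idx)):
--             idx_lst.append(i)
--         elif(split == "train" and (i%skip_every != test_idx) and (i%skip_every != val_idx)):
--             idx_lst.append(i)
--
--     return idx_lst
-- ===== SOURCE B (Python) =====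
-- def get_split_index(max_img_idx, split):
--     if split == "test":
--         return list(range(0, max_img_idx, 20))
--     if split == "val":
--         return list(range(1, max_img_idx, 20))
--     if split == "train":
--         return [i for i in range(max_img_idx) if i % 20 != 0 and i % 20 != 1]
--     return []
-- ===== Notes on version B (the rewrite author's own statement) =====
-- stated objective: simpler
-- what changed: Branch on split first instead of testing split inside every loop iteration: test/val become direct strided ranges with no per-element modulo check, train a single comprehension, unknown splits an immediate [].
import Mathlib
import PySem

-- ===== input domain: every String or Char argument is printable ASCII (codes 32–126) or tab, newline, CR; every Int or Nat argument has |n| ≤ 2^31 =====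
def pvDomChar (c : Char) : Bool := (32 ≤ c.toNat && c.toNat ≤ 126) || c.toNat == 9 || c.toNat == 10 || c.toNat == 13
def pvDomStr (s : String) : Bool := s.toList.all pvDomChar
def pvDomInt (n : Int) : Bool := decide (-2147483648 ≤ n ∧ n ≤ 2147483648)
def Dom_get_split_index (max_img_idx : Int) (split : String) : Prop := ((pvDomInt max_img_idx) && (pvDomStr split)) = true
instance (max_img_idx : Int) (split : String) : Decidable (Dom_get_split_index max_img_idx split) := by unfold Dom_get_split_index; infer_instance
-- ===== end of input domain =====

-- B dispatches on split before looping: test/val are direct strided ranges, train one filter, unknown splits return [] immediately (simpler decomposition; same cost).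


-- ===== PORT A =====
-- literal transliteration: one loop over range(max_img_idx), the if/elif chain appending i
def get_split_index (max_img_idx : Int) (split : String) : List Int :=
  (PySem.List.pyRange 0 max_img_idx 1).foldl
    (fun idx_lst i =>
      if split == "test" && (PySem.Int.mod i 20 == 0) then idx_lst ++ [i]
      else if split == "val" && (PySem.Int.mod i 20 == 1) then idx_lst ++ [i]
      else if split == "train" && !(PySem.Int.mod i 20 == 0) && !(PySem.Int.mod i 20 == 1) then idx_lst ++ [i]
      else idx_lst)
    []

-- ===== PORT B =====
-- branch first: strided ranges for test/val, one comprehension for train, [] otherwise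
def get_split_index_alt (max_img_idx : Int) (split : String) : List Int :=
  if split == "test" then PySem.List.pyRange 0 max_img_idx 20
  else if split == "val" then PySem.List.pyRange 1 max_img_idx 20
  else if split == "train" then
    (PySem.List.pyRange 0 max_img_idx 1).filter
      (fun i => !(PySem.Int.mod i 20 == 0) && !(PySem.Int.mod i 20 == 1))
  else []

-- ===== PRECONDITION & SPEC =====
def Spec_get_split_index (max_img_idx : Int) (split : String) (out : List Int) : Prop := out = get_split_index_alt max_img_idx split
instance (max_img_idx : Int) (split : String) (out : List Int) : Decidable (Spec_get_split_index max_img_idx split out) := by unfold Spec_get_split_index; infer_instance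

-- ===== CLAIM (what is proved, stated in full; the proofs are below) =====
def Claim_equal_get_split_index : Prop := ∀ (max_img_idx : Int) (split : String), Dom_get_split_index max_img_idx split → Spec_get_split_index max_img_idx split (get_split_index max_img_idx split)

-- ===== LEMMAS AND PROOFS =====

-- two strictly increasing lists with the same members are equal
theorem pv_strict_sorted_ext {l₁ l₂ : List Int}
    (h₁ : l₁.Pairwise (· < ·)) (h₂ : l₂.Pairwise (· < ·))
    (hmem : ∀ x, x ∈ l₁ ↔ x ∈ l₂) : l₁ = l₂ := by
  have n₁ : l₁.Nodup := h₁.imp (fun h => ne_of_lt h)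
  have n₂ : l₂.Nodup := h₂.imp (fun h => ne_of_lt h)
  exact List.Perm.eq_of_pairwise
    (fun a b _ _ hab hba => absurd hba (not_lt_of_gt hab)) h₁ h₂
    ((List.perm_ext_iff_of_nodup n₁ n₂).mpr hmem)

theorem pv_pairwise_pyRange_step20 (a b : Int) :
    (PySem.List.pyRange a b 20).Pairwise (· < ·) := by
  rw [PySem.List.pyRange_of_pos _ _ (by norm_num)]
  exact List.pairwise_map.mpr (List.pairwise_lt_range.imp (by intro x y h; omega))

theorem pv_filter_mod_eq_range (a b : Int) (ha : a = 0 ∨ a = 1) :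
    (PySem.List.pyRange 0 b 1).filter (fun i => PySem.Int.mod i 20 == a)
      = PySem.List.pyRange a b 20 := by
  apply pv_strict_sorted_ext
  · exact (PySem.List.pairwise_lt_pyRange_one 0 b).filter _
  · exact pv_pairwise_pyRange_step20 a b
  · intro x
    simp only [List.mem_filter, PySem.List.mem_pyRange_one,
      PySem.List.mem_pyRange_iff_of_pos (by norm_num : (0:Int) < 20),
      PySem.Int.mod, Int.fmod_eq_emod, beq_iff_eq]
    omega

-- collapse A's elif chain into a single appending condition
theorem pv_if_chain {α : Type} (a b c : Bool) (x y : α) :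
    (if a then x else if b then x else if c then x else y)
      = (if a || b || c then x else y) := by
  cases a <;> cases b <;> cases c <;> simp

theorem pv_portA_eq_filter (m : Int) (split : String) :
    get_split_index m split
      = (PySem.List.pyRange 0 m 1).filter
          (fun i => (split == "test" && (PySem.Int.mod i 20 == 0))
            || (split == "val" && (PySem.Int.mod i 20 == 1))
            || (split == "train" && !(PySem.Int.mod i 20 == 0) && !(PySem.Int.mod i 20 == 1))) := by
  unfold get_split_index
  simp only [pv_if_chain, Bool.or_assoc]
  exact PySem.List.foldl_append_if_eq_filter _ _ []

-- ===== VERDICT (by name: the statement is the Claim_ definition above) =====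
theorem get_split_index_spec : Claim_equal_get_split_index := by
  intro m split _
  unfold Spec_get_split_index get_split_index_alt
  rw [pv_portA_eq_filter]
  by_cases ht : split = "test"
  · subst ht
    simpa using pv_filter_mod_eq_range 0 m (Or.inl rfl)
  · by_cases hv : split = "val"
    · subst hv
      simpa using pv_filter_mod_eq_range 1 m (Or.inr rfl)
    · by_cases hr : split = "train"
      · subst hr
        simp
      · simp [ht, hv, hr]
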